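-- pv_equiv track=rewrite | github.com/chamsslash/ege_Informatics | 19-21/ограничение/hm/w.py | f
-- ===== SOURCE A (Python) =====
-- def f(r,h,end):
--     if r<=22 and r>=16:
--         return h in end
--     elif r<=22 and r<=16:
--         return (h%2)!=(end[0]%2)
--     if h>=max(end):return 0
--     skls=[f(r//2,h+1,end),f(r-1,h+1,end)]
--     return  any(skls)    if ((h+1)%2)==(end[0]%2) else all(skls)
-- ===== SOURCE B (Python) =====
-- def f(r, h, end):
--     memo = {}
--
--     def go(r, h):
--         if 16 <= r <= 22:
--             return h in end
--         if r <= 15: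
--             return (h % 2) != (end[0] % 2)
--         if h >= max(end):
--             return False
--         key = (r, h)
--         if key not in memo:
--             win = ((h + 1) % 2) == (end[0] % 2)
--             a = go(r // 2, h + 1)
--             b = go(r - 1, h + 1)
--             memo[key] = (a or b) if win else (a and b)
--         return memo[key]
--
--     return go(r, h)
-- ===== Notes on version B (the rewrite author's own statement) =====
-- stated objective: alternative
-- what changed: B memoizes the game recursion on the state (r, h) in a dict, evaluating each reachable state once instead of A's re-exploration of the full game tree; intended as faster (measured 2.65x at n=256) but unconfirmed at the largest sizes, where both hit Python's recursion limit.
-- outside the precondition, e.g. on f(56, 17, [7]): A returns 0, B returns False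
import Mathlib
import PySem

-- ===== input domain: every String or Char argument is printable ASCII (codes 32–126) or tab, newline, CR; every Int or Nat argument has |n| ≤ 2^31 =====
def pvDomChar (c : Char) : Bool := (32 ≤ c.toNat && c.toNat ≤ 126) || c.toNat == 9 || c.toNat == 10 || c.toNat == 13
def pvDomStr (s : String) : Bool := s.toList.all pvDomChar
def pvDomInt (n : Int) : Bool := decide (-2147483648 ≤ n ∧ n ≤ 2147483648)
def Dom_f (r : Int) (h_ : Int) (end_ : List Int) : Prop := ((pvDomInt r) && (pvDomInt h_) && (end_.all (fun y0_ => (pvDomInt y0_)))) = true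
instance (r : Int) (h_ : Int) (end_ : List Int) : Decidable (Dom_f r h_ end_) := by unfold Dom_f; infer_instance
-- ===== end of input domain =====

-- B memoizes the game recursion on the state (r, h) in a dict, evaluating each reachable state
-- once instead of re-exploring the whole game tree (objective: alternative).

-- ===== PORT A =====
-- literal transliteration of A; Python's `return 0` on `h >= max(end)` is the falsy value `false`;
-- end[0] / max(end) on an empty list raise in Python — those inputs are outside Pre_f, the port
-- uses a default 0 there.
def f (r : Int) (h_ : Int) (end_ : List Int) : Bool :=
  if r ≤ 22 ∧ r ≥ 16 then decide (h_ ∈ end_)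
  else if r ≤ 22 ∧ r ≤ 16 then
    decide (PySem.Int.mod h_ 2 ≠ PySem.Int.mod (PySem.List.pyGetD end_ 0 0) 2)
  else if h_ ≥ ((PySem.List.max? end_ (fun x => x)).getD 0) then
    false
  else
    let s1 := f (PySem.Int.floordiv r 2) (h_ + 1) end_
    let s2 := f (r - 1) (h_ + 1) end_
    if PySem.Int.mod (h_ + 1) 2 = PySem.Int.mod (PySem.List.pyGetD end_ 0 0) 2 then s1 || s2
    else s1 && s2
termination_by r.toNat
decreasing_by
  · have h2 : PySem.Int.floordiv r 2 = r / 2 := PySem.Int.floordiv_eq_ediv_of_pos (by omega)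
    rw [h2]; omega
  · omega

-- ===== PORT B =====
-- the memo dict, threaded through the recursion
def goB (end_ : List Int) (r : Int) (h_ : Int) (m : PySem.Dict (Int × Int) Bool) :
    Bool × PySem.Dict (Int × Int) Bool :=
  if 16 ≤ r ∧ r ≤ 22 then (decide (h_ ∈ end_), m)
  else if r ≤ 15 then
    (decide (PySem.Int.mod h_ 2 ≠ PySem.Int.mod (PySem.List.pyGetD end_ 0 0) 2), m)
  else if h_ ≥ ((PySem.List.max? end_ (fun x => x)).getD 0) then
    (false, m)
  else
    match hmk : m.get? (r, h_) with
    | some v => (v, m)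
    | none =>
      let win := PySem.Int.mod (h_ + 1) 2 = PySem.Int.mod (PySem.List.pyGetD end_ 0 0) 2
      let p1 := goB end_ (PySem.Int.floordiv r 2) (h_ + 1) m
      let p2 := goB end_ (r - 1) (h_ + 1) p1.2
      let res := if win then p1.1 || p2.1 else p1.1 && p2.1
      (res, p2.2.insert (r, h_) res)
termination_by r.toNat
decreasing_by
  · have h2 : PySem.Int.floordiv r 2 = r / 2 := PySem.Int.floordiv_eq_ediv_of_pos (by omega)
    rw [h2]; omega
  · omega

def f_alt (r : Int) (h_ : Int) (end_ : List Int) : Bool :=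
  (goB end_ r h_ PySem.Dict.empty).1

-- ===== PRECONDITION & SPEC =====
-- Pre_f excludes exactly (a) the inputs where A raises (an empty `end` reaching `end[0]` or
-- `max(end)`), and (b) the inputs r >= 23, h >= max(end) where A's top-level `return 0` yields an
-- int 0 instead of a bool, which is outside the declared return type.
def Pre_f (r : Int) (h_ : Int) (end_ : List Int) : Prop :=
  (end_ ≠ [] ∨ (16 ≤ r ∧ r ≤ 22)) ∧
  (23 ≤ r → h_ < (PySem.List.max? end_ (fun x => x)).getD 0)
instance (r : Int) (h_ : Int) (end_ : List Int) : Decidable (Pre_f r h_ end_) := by unfold Pre_f; infer_instance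
def pvWitness_f : Int × Int × List Int := (25, 1, [10])
def Spec_f (r : Int) (h_ : Int) (end_ : List Int) (out : Bool) : Prop := out = f_alt r h_ end_
instance (r : Int) (h_ : Int) (end_ : List Int) (out : Bool) : Decidable (Spec_f r h_ end_ out) := by unfold Spec_f; infer_instance

-- ===== CLAIM (what is proved, stated in full; the proofs are below) =====
def Claim_equal_f : Prop := ∀ (r : Int) (h_ : Int) (end_ : List Int), Dom_f r h_ end_ → Pre_f r h_ end_ → Spec_f r h_ end_ (f r h_ end_)

-- ===== LEMMAS AND PROOFS =====

-- the memo invariant: every stored value is the true game value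
def MemoInv (end_ : List Int) (m : PySem.Dict (Int × Int) Bool) : Prop :=
  ∀ (r h_ : Int) (v : Bool), m.get? (r, h_) = some v → v = f r h_ end_

theorem goB_correct (end_ : List Int) (r h_ : Int) (m : PySem.Dict (Int × Int) Bool)
    (hm : MemoInv end_ m) :
    (goB end_ r h_ m).1 = f r h_ end_ ∧ MemoInv end_ (goB end_ r h_ m).2 := by
  rw [goB]
  by_cases h1 : 16 ≤ r ∧ r ≤ 22
  · rw [if_pos h1]
    refine ⟨?_, hm⟩
    rw [f, if_pos (show r ≤ 22 ∧ r ≥ 16 by omega)]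
  · by_cases h2 : r ≤ 15
    · rw [if_neg h1, if_pos h2]
      refine ⟨?_, hm⟩
      rw [f, if_neg (show ¬ (r ≤ 22 ∧ r ≥ 16) by omega),
          if_pos (show r ≤ 22 ∧ r ≤ 16 by omega)]
    · by_cases h3 : h_ ≥ ((PySem.List.max? end_ (fun x => x)).getD 0)
      · rw [if_neg h1, if_neg h2, if_pos h3]
        refine ⟨?_, hm⟩
        rw [f, if_neg (show ¬ (r ≤ 22 ∧ r ≥ 16) by omega),
            if_neg (show ¬ (r ≤ 22 ∧ r ≤ 16) by omega), if_pos h3]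
      · simp only [if_neg h1, if_neg h2, if_neg h3]
        cases hmk : m.get? (r, h_) with
        | some v => exact ⟨hm r h_ v hmk, hm⟩
        | none =>
          have ih1 := goB_correct end_ (PySem.Int.floordiv r 2) (h_ + 1) m hm
          have ih2 := goB_correct end_ (r - 1) (h_ + 1)
              (goB end_ (PySem.Int.floordiv r 2) (h_ + 1) m).2 ih1.2
          have hAval : f r h_ end_ =
              (if PySem.Int.mod (h_ + 1) 2 = PySem.Int.mod (PySem.List.pyGetD end_ 0 0) 2 then
                (goB end_ (PySem.Int.floordiv r 2) (h_ + 1) m).1 ||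
                  (goB end_ (r - 1) (h_ + 1) (goB end_ (PySem.Int.floordiv r 2) (h_ + 1) m).2).1
              else
                (goB end_ (PySem.Int.floordiv r 2) (h_ + 1) m).1 &&
                  (goB end_ (r - 1) (h_ + 1) (goB end_ (PySem.Int.floordiv r 2) (h_ + 1) m).2).1) := by
            rw [f, if_neg (show ¬ (r ≤ 22 ∧ r ≥ 16) by omega),
                if_neg (show ¬ (r ≤ 22 ∧ r ≤ 16) by omega), if_neg h3, ih1.1, ih2.1]
          refine ⟨hAval.symm, ?_⟩
          intro r' h' v hv
          rw [PySem.Dict.get?_insert] at hv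
          by_cases hk : (r', h') = (r, h_)
          · rw [if_pos hk] at hv
            cases hv
            rw [Prod.mk.injEq] at hk
            obtain ⟨hr, hh⟩ := hk
            subst hr; subst hh
            exact hAval.symm
          · rw [if_neg hk] at hv
            exact ih2.2 r' h' v hv
termination_by r.toNat
decreasing_by
  · have hfd : PySem.Int.floordiv r 2 = r / 2 := PySem.Int.floordiv_eq_ediv_of_pos (by omega)
    rw [hfd]; omega
  · omega

theorem memoInv_empty (end_ : List Int) : MemoInv end_ PySem.Dict.empty := by
  intro r h_ v hv
  simp [PySem.Dict.get?_empty] at hv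

-- ===== VERDICT (by name: the statement is the Claim_ definition above) =====
theorem f_spec : Claim_equal_f := by
  intro r h_ end_ _ _
  unfold Spec_f f_alt
  exact (goB_correct end_ r h_ PySem.Dict.empty (memoInv_empty end_)).1.symm
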